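-- pv_equiv track=rewrite | github.com/bartmanuel/freeway-charging | test-ocm-corridor.py | encode_value
-- ===== SOURCE A (Python) =====
-- def encode_value(value):
--     v = ~(value << 1) if value < 0 else value << 1
--     output = ''
--     while v >= 0x20:
--         output += chr((0x20 | (v & 0x1f)) + 63)
--         v >>= 5
--     output += chr(v + 63)
--     return output
-- ===== SOURCE B (Python) =====
-- def _enc(v):
--     if v < 32:
--         return chr(v + 63)
--     return chr(95 + v % 32) + _enc(v // 32)
--
-- def encode_value(value):
--     v = 2 * value if value >= 0 else -2 * value - 1
--     return _enc(v)
-- ===== Notes on version B (the rewrite author's own statement) =====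
-- stated objective: alternative
-- what changed: B is a recursive, purely arithmetic formulation: the zigzag step is done by doubling (and negate-minus-one for negatives) instead of bit-shift and complement, each base-32 digit is extracted with modulo and floor division instead of mask and shift, and the string is built by recursion on the quotient instead of A's while-loop with a string accumulator.
import Mathlib
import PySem

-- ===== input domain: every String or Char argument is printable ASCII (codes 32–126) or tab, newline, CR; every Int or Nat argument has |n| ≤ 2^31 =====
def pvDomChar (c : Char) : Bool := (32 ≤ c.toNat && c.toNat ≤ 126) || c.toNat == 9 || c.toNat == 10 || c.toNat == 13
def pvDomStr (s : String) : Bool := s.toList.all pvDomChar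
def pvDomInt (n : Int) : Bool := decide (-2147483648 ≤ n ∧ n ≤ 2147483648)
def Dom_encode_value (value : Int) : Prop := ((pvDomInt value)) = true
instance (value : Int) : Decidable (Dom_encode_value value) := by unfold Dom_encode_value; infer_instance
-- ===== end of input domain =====

-- B replaces A's bitwise loop by a recursive, purely arithmetic formulation (zigzag by
-- doubling, digits by modulo and floor division, string built by recursion); same cost.

-- termination measure lemma for A's loop
theorem pvShift_lt (v : Int) (h : 0x20 ≤ v) : (v >>> 5).toNat < v.toNat := by
  have h0 : 0 ≤ v := by omega
  obtain ⟨m, rfl⟩ := Int.eq_ofNat_of_zero_le h0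
  change m >>> 5 < m
  have hm : 32 ≤ m := by exact_mod_cast h
  have : m >>> 5 = m / 32 := Nat.shiftRight_eq_div_pow m 5
  omega

-- termination measure lemma for B's recursion
theorem pvDiv_lt (v : Int) (h : ¬ v < 32) : (PySem.Int.floordiv v 32).toNat < v.toNat := by
  rw [PySem.Int.floordiv_eq_ediv_of_pos (by norm_num)]
  omega

-- ===== PORT A =====
-- A's loop: emit a char per iteration into the accumulated output string
def encLoopA (v : Int) (output : String) : String :=
  if h : 0x20 ≤ v then
    encLoopA (v >>> 5)
      (output ++ String.ofList [Char.ofNat ((PySem.Int.bor 0x20 (PySem.Int.band v 0x1f) + 63).toNat)])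
  else
    output ++ String.ofList [Char.ofNat ((v + 63).toNat)]
termination_by v.toNat
decreasing_by exact pvShift_lt v h

def encode_value (value : Int) : String :=
  let v := if value < 0 then Int.not (value <<< 1) else value <<< 1
  encLoopA v ""

-- ===== PORT B =====
-- B's recursive digit emitter: last char when v < 32, else one char plus the rest
def encB (v : Int) : String :=
  if h : v < 32 then
    String.ofList [Char.ofNat ((v + 63).toNat)]
  else
    String.ofList [Char.ofNat ((95 + PySem.Int.mod v 32).toNat)] ++ encB (PySem.Int.floordiv v 32)
termination_by v.toNat
decreasing_by exact pvDiv_lt v h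

def encode_value_alt (value : Int) : String :=
  let v := if 0 ≤ value then 2 * value else -2 * value - 1
  encB v

-- ===== PRECONDITION & SPEC =====
def Spec_encode_value (value : Int) (out : String) : Prop := out = encode_value_alt value
instance (value : Int) (out : String) : Decidable (Spec_encode_value value out) := by unfold Spec_encode_value; infer_instance

-- ===== CLAIM (what is proved, stated in full; the proofs are below) =====
def Claim_equal_encode_value : Prop := ∀ (value : Int), Dom_encode_value value → Spec_encode_value value (encode_value value)

-- ===== LEMMAS AND PROOFS =====

theorem pvOr32 (m : Nat) (h : m < 32) : 32 ||| m = 32 + m := by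
  interval_cases m <;> decide

theorem pvBor (v : Int) (h : 0 ≤ v) :
    PySem.Int.bor 0x20 (PySem.Int.band v 0x1f) = 32 + PySem.Int.mod v 32 := by
  obtain ⟨n, rfl⟩ := Int.eq_ofNat_of_zero_le h
  have h1 : PySem.Int.band (n : Int) 0x1f = ((n &&& 31 : Nat) : Int) := by
    exact_mod_cast PySem.Int.band_natCast n 31
  have h2 : n &&& 31 = n % 32 := by
    have := Nat.and_two_pow_sub_one_eq_mod n 5
    simpa using this
  have h3 : PySem.Int.mod (n : Int) 32 = ((n % 32 : Nat) : Int) := by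
    exact_mod_cast PySem.Int.mod_natCast n 32
  rw [h1, h2, h3]
  have h4 : PySem.Int.bor 32 ((n % 32 : Nat) : Int) = ((32 ||| n % 32 : Nat) : Int) := by
    exact_mod_cast PySem.Int.bor_natCast 32 (n % 32)
  rw [h4, pvOr32 (n % 32) (Nat.mod_lt n (by norm_num))]
  push_cast
  ring

theorem pvShr (v : Int) (h : 0 ≤ v) : v >>> 5 = PySem.Int.floordiv v 32 := by
  obtain ⟨n, rfl⟩ := Int.eq_ofNat_of_zero_le h
  rw [PySem.Int.floordiv_eq_ediv_of_pos (by norm_num)]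
  have h1 : ((n : Int)) >>> (5 : Int) = ((n >>> 5 : Nat) : Int) := by
    exact_mod_cast Int.shiftRight_natCast n 5
  rw [h1, Nat.shiftRight_eq_div_pow n 5]
  omega

-- A's loop with any accumulated prefix equals that prefix followed by B's recursion
theorem encLoopA_eq (v : Int) (output : String) (h0 : 0 ≤ v) :
    encLoopA v output = output ++ encB v := by
  induction v, output using encLoopA.induct with
  | case1 v output h ih =>
    rw [encLoopA, encB]
    have hlt : ¬ v < 32 := by omega
    simp only [h, dite_true, hlt, dite_false]
    have hsr := pvShr v (by omega)
    have hnn : 0 ≤ v >>> 5 := by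
      rw [hsr, PySem.Int.floordiv_eq_ediv_of_pos (by norm_num)]
      omega
    rw [ih hnn, hsr, pvBor v (by omega)]
    have : (32 : Int) + PySem.Int.mod v 32 + 63 = 95 + PySem.Int.mod v 32 := by ring
    rw [this, String.append_assoc]
  | case2 v output h =>
    rw [encLoopA, encB]
    have : v < 32 := by omega
    simp [this]

-- the arithmetic zigzag equals the bitwise zigzag
theorem pvZig (value : Int) :
    (if value < 0 then Int.not (value <<< 1) else value <<< 1) =
      (if 0 ≤ value then 2 * value else -2 * value - 1) := by
  have hs : value <<< 1 = 2 * value := by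
    show value <<< ((1 : Nat) : Int) = 2 * value
    rw [Int.shiftLeft_eq_mul_pow]
    ring
  have hn : Int.not (value <<< 1) = -(value <<< 1) - 1 := by
    cases h : value <<< 1 <;> simp [Int.not, Int.negSucc_eq] <;> omega
  rcases lt_or_ge value 0 with h | h
  · rw [if_pos h, if_neg (by omega : ¬ 0 ≤ value), hn, hs]
    ring
  · rw [if_neg (by omega : ¬ value < 0), if_pos (by omega : 0 ≤ value), hs]

-- ===== VERDICT (by name: the statement is the Claim_ definition above) =====
theorem encode_value_spec : Claim_equal_encode_value := by
  intro value _
  unfold Spec_encode_value encode_value encode_value_alt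
  simp only [pvZig]
  have h0 : 0 ≤ (if 0 ≤ value then 2 * value else -2 * value - 1) := by
    split_ifs <;> omega
  rw [encLoopA_eq _ _ h0]
  simp
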